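-- pv_equiv track=rewrite | github.com/vissuresh/PDSA_IITM | Week 1/GRPA1_Ver1.py | find_Min_Difference
-- ===== SOURCE A (Python) =====
-- def find_Min_Difference(L,P):
--     import sys
--     res=[[]]
--     for i in L:
--         for j in range(len(res)):
--             if(len(res[j])!=P):
--                 res.append(res[j]+[i])
--
--     j=0
--     while(j<len(res)):
--         if(len(res[j])!=P):
--             res.pop(j)
--         else:
--             j+=1
--
--     diff=sys.maxsize
--
--     for j in range(len(res)):
--         res[j].sort()
--         if(res[j][-1]-res[j][0]<diff):
--             diff=res[j][-1]-res[j][0]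
--
--     return diff
-- ===== SOURCE B (Python) =====
-- def find_Min_Difference(L, P):
--     S = sorted(L)
--     diff = 9223372036854775807  # sys.maxsize: returned when no window of P elements exists
--     for i in range(len(S) - P + 1):
--         d = S[i + P - 1] - S[i]
--         if d < diff:
--             diff = d
--     return diff
-- ===== Notes on version B (the rewrite author's own statement) =====
-- stated objective: faster
-- what changed: A enumerates all C(n,P) subsequences of length P (building every subsequence of length <= P first) and sorts each one; B sorts L once and takes the minimum spread over the n-P+1 windows of P consecutive elements of the sorted list.
-- outside the precondition, e.g. on find_Min_Difference([1, 2], -1): A returns 9223372036854775807, B raises IndexError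
import Mathlib
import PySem

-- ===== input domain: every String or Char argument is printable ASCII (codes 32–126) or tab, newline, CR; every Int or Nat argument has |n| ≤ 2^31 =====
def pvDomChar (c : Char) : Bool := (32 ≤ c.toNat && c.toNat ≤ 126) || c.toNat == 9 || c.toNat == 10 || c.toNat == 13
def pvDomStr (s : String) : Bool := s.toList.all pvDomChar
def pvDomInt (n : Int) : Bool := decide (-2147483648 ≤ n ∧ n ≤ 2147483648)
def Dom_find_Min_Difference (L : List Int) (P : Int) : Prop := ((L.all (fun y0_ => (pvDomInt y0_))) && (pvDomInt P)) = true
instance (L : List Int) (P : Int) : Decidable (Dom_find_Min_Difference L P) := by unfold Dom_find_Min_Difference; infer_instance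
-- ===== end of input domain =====

-- B replaces A's exponential enumeration of all P-element subsequences by one sort of L
-- and a single scan over the windows of P consecutive elements (objective: faster).

-- ===== PORT A =====
-- inner loop 'for j in range(len(res)): if len(res[j])!=P: res.append(res[j]+[i])'
-- (iterates over the snapshot of res taken when range() was evaluated, appending to res)
def pvExtend (P : Int) (res : List (List Int)) (i : Int) : List (List Int) :=
  res.foldl (fun acc r => if (r.length : Int) ≠ P then acc ++ [r ++ [i]] else acc) res

-- 'j=0; while j<len(res): if len(res[j])!=P: res.pop(j) else: j+=1'
def pvPopLoop (P : Int) (j : Nat) (res : List (List Int)) : List (List Int) :=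
  if h : j < res.length then
    if (res[j].length : Int) ≠ P then pvPopLoop P j (res.eraseIdx j)
    else pvPopLoop P (j + 1) res
  else res
termination_by (res.length, res.length - j)
decreasing_by
  · have := List.length_eraseIdx_of_lt h
    exact Prod.Lex.left _ _ (by omega)
  · exact Prod.Lex.right _ (by omega)

def find_Min_Difference (L : List Int) (P : Int) : Int :=
  let res := L.foldl (pvExtend P) [[]]
  let res2 := pvPopLoop P 0 res
  res2.foldl (fun diff r =>
    let s := PySem.List.sorted r (fun x => x)   -- res[j].sort()
    match PySem.List.pyGet? s (-1), PySem.List.pyGet? s 0 with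
    | some a, some b => if a - b < diff then a - b else diff
    | _, _ => diff) 9223372036854775807         -- sys.maxsize

-- ===== PORT B =====
def find_Min_Difference_alt (L : List Int) (P : Int) : Int :=
  let S := PySem.List.sorted L (fun x => x)
  (PySem.List.pyRange 0 ((S.length : Int) - P + 1)).foldl (fun diff i =>
    match PySem.List.pyGet? S (i + P - 1) with
    | none => diff
    | some d1 =>
      match PySem.List.pyGet? S i with
      | none => diff
      | some d2 => if d1 - d2 < diff then d1 - d2 else diff) 9223372036854775807

-- ===== PRECONDITION & SPEC =====
-- Pre_ excludes non-positive subset sizes P < 1, outside the natural domain: for P = 0 the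
-- Python A raises IndexError, and for P < 0 A returns the sys.maxsize sentinel while B raises.
def Pre_find_Min_Difference (L : List Int) (P : Int) : Prop := 1 ≤ P
instance (L : List Int) (P : Int) : Decidable (Pre_find_Min_Difference L P) := by unfold Pre_find_Min_Difference; infer_instance
def pvWitness_find_Min_Difference : List Int × Int := ([3, 1, 4, 1, 5], 2)

def Spec_find_Min_Difference (L : List Int) (P : Int) (out : Int) : Prop := out = find_Min_Difference_alt L P
instance (L : List Int) (P : Int) (out : Int) : Decidable (Spec_find_Min_Difference L P out) := by unfold Spec_find_Min_Difference; infer_instance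

-- ===== CLAIM (what is proved, stated in full; the proofs are below) =====
def Claim_equal_find_Min_Difference : Prop := ∀ (L : List Int) (P : Int), Dom_find_Min_Difference L P → Pre_find_Min_Difference L P → Spec_find_Min_Difference L P (find_Min_Difference L P)

-- ===== LEMMAS AND PROOFS =====

-- spread of one subsequence, as A's diff loop computes it on a nonempty list
def pvSpread (r : List Int) : Int :=
  (PySem.List.sorted r (fun x => x)).getLast?.getD 0 - ((PySem.List.sorted r (fun x => x))[0]?).getD 0

-- one window value, as B's loop computes it
def pvWin (S : List Int) (P : Int) (i : Int) : Int :=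
  (PySem.List.pyGet? S (i + P - 1)).getD 0 - (PySem.List.pyGet? S i).getD 0

lemma mem_pvExtend (P : Int) (res : List (List Int)) (i : Int) (r : List Int) :
    r ∈ pvExtend P res i ↔ r ∈ res ∨ ∃ s ∈ res, (s.length : Int) ≠ P ∧ r = s ++ [i] := by
  unfold pvExtend
  rw [PySem.List.foldl_append_ite (p := fun r => (r.length : Int) ≠ P) (f := fun r => r ++ [i])]
  simp [List.mem_append, List.mem_filter, List.mem_map]
  constructor
  · rintro (h | ⟨s, ⟨hs, hne⟩, rfl⟩)
    · exact Or.inl h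
    · exact Or.inr ⟨s, hs, hne, rfl⟩
  · rintro (h | ⟨s, hs, hne, rfl⟩)
    · exact Or.inl h
    · exact Or.inr ⟨s, ⟨hs, hne⟩, rfl⟩

lemma mem_build_aux (P : Int) (L : List Int) :
    ∀ (acc : List (List Int)), (∀ r ∈ acc, (r.length : Int) ≤ P) →
      ∀ r, r ∈ L.foldl (pvExtend P) acc ↔
        ∃ s ∈ acc, ∃ t, t.Sublist L ∧ r = s ++ t ∧ (r.length : Int) ≤ P := by
  induction L with
  | nil =>
    intro acc hacc r
    simp only [List.foldl_nil]
    constructor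
    · intro hr
      exact ⟨r, hr, [], List.nil_sublist _, by simp, by simpa using hacc r hr⟩
    · rintro ⟨s, hs, t, ht, rfl, _⟩
      have := List.sublist_nil.mp ht
      subst this; simpa using hs
  | cons i L ih =>
    intro acc hacc r
    simp only [List.foldl_cons]
    have hacc' : ∀ r ∈ pvExtend P acc i, (r.length : Int) ≤ P := by
      intro r hr
      rcases (mem_pvExtend P acc i r).mp hr with h | ⟨s, hs, hne, rfl⟩
      · exact hacc r h
      · have := hacc s hs
        simp only [List.length_append, List.length_singleton]
        push_cast
        omega
    rw [ih (pvExtend P acc i) hacc' r]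
    constructor
    · rintro ⟨s, hs, t, ht, rfl, hlen⟩
      rcases (mem_pvExtend P acc i s).mp hs with h | ⟨s', hs', hne, rfl⟩
      · exact ⟨s, h, t, ht.trans (List.sublist_cons_self i L), rfl, hlen⟩
      · exact ⟨s', hs', i :: t, by simpa using List.Sublist.cons₂ i ht, by simp, hlen⟩
    · rintro ⟨s, hs, t, ht, rfl, hlen⟩
      rcases List.sublist_cons_iff.mp ht with h | ⟨t', rfl, ht'⟩
      · exact ⟨s, (mem_pvExtend P acc i s).mpr (Or.inl hs), t, h, rfl, hlen⟩
      · refine ⟨s ++ [i], (mem_pvExtend P acc i (s ++ [i])).mpr (Or.inr ⟨s, hs, ?_, rfl⟩), t', ht', by simp, hlen⟩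
        have h1 := hacc s hs
        simp only [List.length_append, List.length_cons] at hlen
        push_cast at hlen ⊢
        omega

lemma mem_build (P : Int) (hP : 0 ≤ P) (L : List Int) (r : List Int) :
    r ∈ L.foldl (pvExtend P) [[]] ↔ r.Sublist L ∧ (r.length : Int) ≤ P := by
  rw [mem_build_aux P L [[]] (by simpa using hP) r]
  constructor
  · rintro ⟨s, hs, t, ht, rfl, hlen⟩
    simp only [List.mem_singleton] at hs; subst hs
    simpa using ⟨ht, hlen⟩
  · rintro ⟨ht, hlen⟩
    exact ⟨[], by simp, r, ht, by simp, hlen⟩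

lemma pvPopLoop_eq (P : Int) : ∀ (j : Nat) (res : List (List Int)),
    pvPopLoop P j res = res.take j ++ (res.drop j).filter (fun r => decide ((r.length : Int) = P)) := by
  intro j res
  induction j, res using pvPopLoop.induct P with
  | case1 j res h hne ih =>
    rw [pvPopLoop]
    rw [dif_pos h, if_pos hne, ih]
    have hdrop : res.drop j = res[j] :: res.drop (j + 1) := List.drop_eq_getElem_cons h
    rw [List.eraseIdx_eq_take_drop_succ res j]
    have hlen : (res.take j).length = j := List.length_take_of_le (by omega)
    rw [List.take_append_of_le_length (by omega), List.take_take, min_self,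
        List.drop_append_of_le_length (by omega),
        List.drop_eq_nil_of_le (as := res.take j) (by simp)]
    rw [hdrop, List.filter_cons]
    simp [hne]
  | case2 j res h hne ih =>
    rw [pvPopLoop]
    rw [dif_pos h, if_neg hne, ih]
    have hdrop : res.drop j = res[j] :: res.drop (j + 1) := List.drop_eq_getElem_cons h
    have htake : res.take (j + 1) = res.take j ++ [res[j]] := by
      rw [List.take_add_one]
      simp [List.getElem?_eq_getElem h]
    simp only [ne_eq, not_not] at hne
    rw [hdrop, List.filter_cons]
    simp only [hne, decide_true, if_true, htake, List.append_assoc, List.singleton_append]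
  | case3 j res h =>
    rw [pvPopLoop]
    rw [dif_neg h]
    rw [List.take_of_length_le (by omega), List.drop_eq_nil_of_le (by omega)]
    simp

lemma mem_res2 (P : Int) (hP : 1 ≤ P) (L : List Int) (r : List Int) :
    r ∈ pvPopLoop P 0 (L.foldl (pvExtend P) [[]]) ↔ r.Sublist L ∧ (r.length : Int) = P := by
  rw [pvPopLoop_eq]
  simp only [List.take_zero, List.drop_zero, List.nil_append, List.mem_filter,
    decide_eq_true_eq]
  rw [mem_build P (by omega) L r]
  constructor
  · rintro ⟨⟨h1, _⟩, h3⟩; exact ⟨h1, h3⟩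
  · rintro ⟨h1, h2⟩; exact ⟨⟨h1, by omega⟩, h2⟩

lemma foldl_min_eq_of_dom (M : Int) (xs ys : List Int)
    (h1 : ∀ x ∈ xs, ∃ y ∈ ys, y ≤ x) (h2 : ∀ y ∈ ys, ∃ x ∈ xs, x ≤ y) :
    xs.foldl min M = ys.foldl min M := by
  have lx := PySem.List.foldl_min_le xs M
  have ly := PySem.List.foldl_min_le ys M
  apply le_antisymm
  · rcases PySem.List.foldl_min_mem ys M with h | h
    · rw [h]; exact lx.1
    · obtain ⟨x, hx, hxy⟩ := h2 _ h
      exact le_trans (lx.2 x hx) hxy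
  · rcases PySem.List.foldl_min_mem xs M with h | h
    · rw [h]; exact ly.1
    · obtain ⟨y, hy, hyx⟩ := h1 _ h
      exact le_trans (ly.2 y hy) hyx

lemma stepA_eq (diff : Int) (r : List Int) (hne : r ≠ []) :
    (match PySem.List.pyGet? (PySem.List.sorted r (fun x => x)) (-1),
           PySem.List.pyGet? (PySem.List.sorted r (fun x => x)) 0 with
     | some a, some b => if a - b < diff then a - b else diff
     | _, _ => diff) = min diff (pvSpread r) := by
  have hs : PySem.List.sorted r (fun x => x) ≠ [] := by
    simpa [PySem.List.sorted_eq_nil_iff] using hne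
  rw [PySem.List.pyGet?_neg_one, PySem.List.pyGet?_zero]
  obtain ⟨a, ha⟩ := Option.ne_none_iff_exists'.mp (mt List.getLast?_eq_none_iff.mp hs)
  obtain ⟨b, hb⟩ : ∃ b, (PySem.List.sorted r (fun x => x))[0]? = some b := by
    have : 0 < (PySem.List.sorted r (fun x => x)).length := List.length_pos_iff.mpr hs
    exact ⟨_, List.getElem?_eq_getElem this⟩
  rw [ha, hb]
  simp only [pvSpread, ha, hb, Option.getD_some]
  rw [min_def]
  split_ifs with h1 h2 h3 <;> first | rfl | omega

-- A's diff loop is a running min of pvSpread over res2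
lemma portA_eq_foldl_min (L : List Int) (P : Int) (hP : 1 ≤ P) :
    find_Min_Difference L P =
      ((pvPopLoop P 0 (L.foldl (pvExtend P) [[]])).map pvSpread).foldl min 9223372036854775807 := by
  unfold find_Min_Difference
  rw [List.foldl_map]
  apply PySem.List.foldl_congr_mem
  intro acc r hr
  have hne : r ≠ [] := by
    have := (mem_res2 P hP L r).mp hr
    intro h; subst h; simp at this; omega
  simpa using stepA_eq acc r hne

lemma stepB_eq (L : List Int) (P : Int) (hP : 1 ≤ P) (diff i : Int)
    (hi : i ∈ PySem.List.pyRange 0 (((PySem.List.sorted L (fun x => x)).length : Int) - P + 1)) :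
    (match PySem.List.pyGet? (PySem.List.sorted L (fun x => x)) (i + P - 1) with
     | none => diff
     | some d1 =>
       match PySem.List.pyGet? (PySem.List.sorted L (fun x => x)) i with
       | none => diff
       | some d2 => if d1 - d2 < diff then d1 - d2 else diff) =
      min diff (pvWin (PySem.List.sorted L (fun x => x)) P i) := by
  obtain ⟨h0, h1⟩ := PySem.List.mem_pyRange_one.mp hi
  have e1 := PySem.List.pyGet?_eq_some_getElem (PySem.List.sorted L (fun x => x))
    (show (0 : Int) ≤ i + P - 1 by omega) (show i + P - 1 < ((PySem.List.sorted L (fun x => x)).length : Int) by omega)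
  have e2 := PySem.List.pyGet?_eq_some_getElem (PySem.List.sorted L (fun x => x))
    h0 (show i < ((PySem.List.sorted L (fun x => x)).length : Int) by omega)
  rw [e1, e2]
  unfold pvWin
  rw [e1, e2]
  simp only [Option.getD_some]
  rw [min_def]
  split_ifs with hh1 hh2 hh3 <;> first | rfl | omega

-- B's loop is a running min of pvWin over the index range
lemma portB_eq_foldl_min (L : List Int) (P : Int) (hP : 1 ≤ P) :
    find_Min_Difference_alt L P =
      ((PySem.List.pyRange 0 (((PySem.List.sorted L (fun x => x)).length : Int) - P + 1)).map
        (pvWin (PySem.List.sorted L (fun x => x)) P)).foldl min 9223372036854775807 := by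
  unfold find_Min_Difference_alt
  rw [List.foldl_map]
  apply PySem.List.foldl_congr_mem
  intro acc i hi
  simpa using stepB_eq L P hP acc i hi

-- strictly increasing index lists move at least one step per position
lemma strict_incr_getElem_le {N : Nat} (is : List (Fin N)) (h : is.Pairwise (· < ·)) :
    ∀ q (hq : q < is.length) (h0 : 0 < is.length), (is[0]'h0).val + q ≤ (is[q]'hq).val := by
  intro q
  induction q with
  | zero => intro hq h0; simp
  | succ q ihq =>
    intro hq h0
    have hlt : (is[q]'(by omega)) < (is[q + 1]'hq) :=
      List.pairwise_iff_getElem.mp h q (q + 1) (by omega) hq (by omega)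
    have := ihq (by omega) h0
    have hv : (is[q]'(by omega)).val < (is[q + 1]'hq).val := hlt
    omega

-- in a list sorted non-decreasingly, getElem is monotone in the index
lemma pairwise_le_getElem_mono (S : List Int) (h : S.Pairwise (· ≤ ·)) {p q : Nat}
    (hpq : p ≤ q) (hq : q < S.length) : S[p]'(by omega) ≤ S[q]'hq := by
  rcases eq_or_lt_of_le hpq with rfl | hlt
  · exact le_refl _
  · exact List.pairwise_iff_getElem.mp h p q (by omega) hq hlt

-- every nonempty subsequence of a non-decreasing list is dominated by some window of the same length
lemma exists_window (S t : List Int) (hpw : S.Pairwise (· ≤ ·)) (ht : t.Sublist S)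
    (hne : t ≠ []) :
    ∃ j : Nat, j + t.length ≤ S.length ∧
      (S[j + t.length - 1]?).getD 0 - (S[j]?).getD 0 ≤
      t.getLast?.getD 0 - (t[0]?).getD 0 := by
  obtain ⟨is, hmap, hpwi⟩ := List.sublist_eq_map_getElem ht
  subst hmap
  have hpos : 0 < is.length := by
    rcases is with _ | _
    · simp at hne
    · simp
  have hstep := strict_incr_getElem_le is hpwi (is.length - 1) (by omega) hpos
  have hlastLt : ((is[is.length - 1]'(by omega)) : Fin S.length).val < S.length :=
    (is[is.length - 1]'(by omega)).isLt
  refine ⟨(is[0]'hpos).val, by simpa using by omega, ?_⟩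
  simp only [List.length_map, List.getLast?_eq_getElem?, List.getElem?_map]
  rw [List.getElem?_eq_getElem hpos,
      List.getElem?_eq_getElem (show is.length - 1 < is.length by omega),
      List.getElem?_eq_getElem (show (is[0]'hpos).val + is.length - 1 < S.length by omega),
      List.getElem?_eq_getElem (show ((is[0]'hpos) : Fin S.length).val < S.length from (is[0]'hpos).isLt)]
  simp only [Option.map_some, Option.getD_some, Fin.getElem_fin]
  have hmono : S[(is[0]'hpos).val + is.length - 1]'(by omega) ≤
      S[((is[is.length - 1]'(by omega)) : Fin S.length).val]'hlastLt :=
    pairwise_le_getElem_mono S hpw (by omega) hlastLt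
  omega

-- a window of a list, explicitly
lemma window_facts (S : List Int) (m j : Nat) (hm : 0 < m) (hj : j + m ≤ S.length) :
    ∃ t : List Int, t.Sublist S ∧ t.length = m ∧
      (t[0]?).getD 0 = (S[j]?).getD 0 ∧
      t.getLast?.getD 0 = (S[j + m - 1]?).getD 0 := by
  refine ⟨(S.drop j).take m, ?_, ?_, ?_, ?_⟩
  · exact (List.take_sublist _ _).trans (List.drop_sublist _ _)
  · rw [List.length_take, List.length_drop]; omega
  · have h0 : 0 < ((S.drop j).take m).length := by
      rw [List.length_take, List.length_drop]; omega
    rw [List.getElem?_eq_getElem h0, List.getElem_take, List.getElem_drop,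
        List.getElem?_eq_getElem (by omega : j < S.length)]
    simp
  · have hlen : ((S.drop j).take m).length = m := by
      rw [List.length_take, List.length_drop]; omega
    rw [List.getLast?_eq_getElem?, hlen]
    rw [List.getElem?_eq_getElem (by omega : m - 1 < ((S.drop j).take m).length),
        List.getElem_take, List.getElem_drop,
        List.getElem?_eq_getElem (by omega : j + m - 1 < S.length)]
    simp only [Option.getD_some]
    congr 1
    omega

-- pvSpread is invariant under permutation
lemma pvSpread_perm (r t : List Int) (h : r.Perm t) : pvSpread r = pvSpread t := by
  unfold pvSpread
  rw [(PySem.List.sorted_id_eq_sorted_id_iff_perm r t).mpr h]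

-- on a sublist of sorted L, sorting is the identity
lemma sorted_of_sublist_sorted (L t : List Int)
    (ht : t.Sublist (PySem.List.sorted L (fun x => x))) :
    PySem.List.sorted t (fun x => x) = t := by
  apply PySem.List.sorted_eq_self_of_pairwise
  exact (PySem.List.sorted_pairwise L (fun x => x)).sublist ht

lemma pvSpread_of_sublist_sorted (L t : List Int)
    (ht : t.Sublist (PySem.List.sorted L (fun x => x))) :
    pvSpread t = t.getLast?.getD 0 - (t[0]?).getD 0 := by
  unfold pvSpread
  rw [sorted_of_sublist_sorted L t ht]

-- ===== VERDICT (by name: the statement is the Claim_ definition above) =====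
theorem find_Min_Difference_spec : Claim_equal_find_Min_Difference := by
  intro L P hdom hP
  unfold Spec_find_Min_Difference
  have hP1 : 1 ≤ P := hP
  have hSlen : (PySem.List.sorted L (fun x => x)).length = L.length :=
    PySem.List.length_sorted L _ _
  have hSperm : (PySem.List.sorted L (fun x => x)).Perm L := PySem.List.sorted_perm L _ _
  have hSpw : (PySem.List.sorted L (fun x => x)).Pairwise (· ≤ ·) :=
    PySem.List.sorted_pairwise L (fun x => x)
  rw [portA_eq_foldl_min L P hP1, portB_eq_foldl_min L P hP1]
  apply foldl_min_eq_of_dom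
  · -- every subset spread is dominated by some window value
    intro x hx
    rw [List.mem_map] at hx
    obtain ⟨r, hr, rfl⟩ := hx
    obtain ⟨hrs, hrlen⟩ := (mem_res2 P hP1 L r).mp hr
    have hrsub : r.Subperm (PySem.List.sorted L (fun x => x)) :=
      hrs.subperm.trans hSperm.symm.subperm
    obtain ⟨t, htr, hts⟩ := hrsub
    have htlen : t.length = r.length := htr.length_eq
    have htne : t ≠ [] := by
      intro h; subst h; simp at htlen; omega
    obtain ⟨j, hj, hws⟩ := exists_window (PySem.List.sorted L (fun x => x)) t hSpw hts htne
    refine ⟨pvWin (PySem.List.sorted L (fun x => x)) P (j : Int), ?_, ?_⟩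
    · rw [List.mem_map]
      refine ⟨(j : Int), ?_, rfl⟩
      rw [PySem.List.mem_pyRange_one]
      constructor
      · omega
      · omega
    · have hspread : pvSpread r = t.getLast?.getD 0 - (t[0]?).getD 0 := by
        rw [pvSpread_perm r t htr.symm, pvSpread_of_sublist_sorted L t hts]
      have hwin : pvWin (PySem.List.sorted L (fun x => x)) P (j : Int) =
          ((PySem.List.sorted L (fun x => x))[j + t.length - 1]?).getD 0 -
            ((PySem.List.sorted L (fun x => x))[j]?).getD 0 := by
        unfold pvWin
        rw [PySem.List.pyGet?_eq_some_getElem (PySem.List.sorted L (fun x => x))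
              (show (0 : Int) ≤ (j : Int) + P - 1 by omega) (by omega),
            PySem.List.pyGet?_eq_some_getElem (PySem.List.sorted L (fun x => x))
              (show (0 : Int) ≤ (j : Int) by omega) (by omega)]
        rw [List.getElem?_eq_getElem (show j + t.length - 1 < (PySem.List.sorted L (fun x => x)).length by omega),
            List.getElem?_eq_getElem (show j < (PySem.List.sorted L (fun x => x)).length by omega)]
        simp only [Option.getD_some]
        congr 2
        omega
      rw [hspread, hwin]
      exact hws
  · -- every window value is realised by some subset
    intro y hy
    rw [List.mem_map] at hy
    obtain ⟨i, hi, rfl⟩ := hy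
    obtain ⟨h0, h1⟩ := PySem.List.mem_pyRange_one.mp hi
    have hm : 0 < P.toNat := by omega
    have hjm : i.toNat + P.toNat ≤ (PySem.List.sorted L (fun x => x)).length := by omega
    obtain ⟨t, hts, htlen, hthead, htlast⟩ :=
      window_facts (PySem.List.sorted L (fun x => x)) P.toNat i.toNat hm hjm
    have htsub : t.Subperm L := hts.subperm.trans hSperm.subperm
    obtain ⟨r, hrt, hrs⟩ := htsub
    have hrlen : r.length = t.length := hrt.length_eq
    refine ⟨pvSpread r, ?_, ?_⟩
    · rw [List.mem_map]
      refine ⟨r, (mem_res2 P hP1 L r).mpr ⟨hrs, by rw [hrlen, htlen]; omega⟩, rfl⟩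
    · have hspread : pvSpread r = t.getLast?.getD 0 - (t[0]?).getD 0 := by
        rw [pvSpread_perm r t hrt, pvSpread_of_sublist_sorted L t hts]
      have hwin : pvWin (PySem.List.sorted L (fun x => x)) P i =
          ((PySem.List.sorted L (fun x => x))[i.toNat + P.toNat - 1]?).getD 0 -
            ((PySem.List.sorted L (fun x => x))[i.toNat]?).getD 0 := by
        unfold pvWin
        rw [PySem.List.pyGet?_eq_some_getElem (PySem.List.sorted L (fun x => x))
              (show (0 : Int) ≤ i + P - 1 by omega) (by omega),
            PySem.List.pyGet?_eq_some_getElem (PySem.List.sorted L (fun x => x)) h0 (by omega)]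
        rw [List.getElem?_eq_getElem (show i.toNat + P.toNat - 1 < (PySem.List.sorted L (fun x => x)).length by omega),
            List.getElem?_eq_getElem (show i.toNat < (PySem.List.sorted L (fun x => x)).length by omega)]
        simp only [Option.getD_some]
        congr 2
        omega
      rw [hspread, hwin, hthead, htlast]
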